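-- pv_equiv track=rewrite | github.com/leeseulhui/Baekjoon | 프로그래머스/1/82612. 부족한 금액 계산하기/부족한 금액 계산하기.py | solution
-- ===== SOURCE A (Python) =====
-- def solution(price, money, count):
--     ans = 0
--
--     for i in range(1, count + 1):
--         ans += price * i
--
--     if ans < money:
--         ans = 0
--     else:
--         ans = ans - money
--
--     return ans
-- ===== SOURCE B (Python) =====
-- def solution(price, money, count):
--     n = count if count > 0 else 0
--     total = price * (n * (n + 1) // 2)
--     shortfall = total - money
--     return shortfall if shortfall > 0 else 0
-- ===== Notes on version B (the rewrite author's own statement) =====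
-- stated objective: faster
-- what changed: Replaced A's loop that accumulates price*i for i in 1..count with the closed-form triangular-number formula price*(n*(n+1)//2) (n = max(count,0)) followed by max(total-money, 0).
import Mathlib
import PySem

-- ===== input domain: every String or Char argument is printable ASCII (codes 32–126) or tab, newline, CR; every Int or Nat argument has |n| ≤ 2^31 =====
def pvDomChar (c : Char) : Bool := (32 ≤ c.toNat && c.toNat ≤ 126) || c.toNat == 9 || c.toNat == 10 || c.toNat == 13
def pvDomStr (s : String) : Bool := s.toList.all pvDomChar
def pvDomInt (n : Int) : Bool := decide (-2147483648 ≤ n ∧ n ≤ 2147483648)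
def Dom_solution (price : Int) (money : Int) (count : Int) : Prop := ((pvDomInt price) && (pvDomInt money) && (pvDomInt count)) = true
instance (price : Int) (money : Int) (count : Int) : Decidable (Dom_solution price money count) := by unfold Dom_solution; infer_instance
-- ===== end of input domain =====

-- B replaces A's O(count) accumulation loop by the closed-form triangular sum (O(1)); same return value everywhere.

-- ===== PORT A =====
def solution (price : Int) (money : Int) (count : Int) : Int :=
  let ans := (PySem.List.pyRange 1 (count + 1) 1).foldl (fun a i => a + price * i) 0
  if ans < money then 0 else ans - money

-- ===== PORT B =====
def solution_alt (price : Int) (money : Int) (count : Int) : Int :=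
  let n := if count > 0 then count else 0
  let total := price * PySem.Int.floordiv (n * (n + 1)) 2
  let shortfall := total - money
  if shortfall > 0 then shortfall else 0

-- ===== PRECONDITION & SPEC =====
def Spec_solution (price : Int) (money : Int) (count : Int) (out : Int) : Prop := out = solution_alt price money count
instance (price : Int) (money : Int) (count : Int) (out : Int) : Decidable (Spec_solution price money count out) := by unfold Spec_solution; infer_instance

-- ===== CLAIM (what is proved, stated in full; the proofs are below) =====
def Claim_equal_solution : Prop := ∀ (price : Int) (money : Int) (count : Int), Dom_solution price money count → Spec_solution price money count (solution price money count)

-- ===== LEMMAS AND PROOFS =====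

lemma fd2_even (m : Int) : PySem.Int.floordiv (2 * m) 2 = m := by
  rw [PySem.Int.floordiv_eq_ediv_of_pos (by norm_num)]
  exact Int.mul_ediv_cancel_left m (by norm_num)

lemma tri_exists (k : Nat) : ∃ m : Int, (k : Int) * ((k : Int) + 1) = 2 * m := by
  induction k with
  | zero => exact ⟨0, by norm_num⟩
  | succ k ih =>
    obtain ⟨m, hm⟩ := ih
    exact ⟨m + (k : Int) + 1, by push_cast; linear_combination hm⟩

lemma fold_sum (price : Int) (k : Nat) :
    (PySem.List.pyRange 1 ((k : Int) + 1) 1).foldl (fun a i => a + price * i) 0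
      = price * PySem.Int.floordiv ((k : Int) * ((k : Int) + 1)) 2 := by
  induction k with
  | zero =>
    rw [PySem.List.pyRange_one_eq_nil (by norm_num)]
    simp [PySem.Int.floordiv]
  | succ k ih =>
    have h : PySem.List.pyRange 1 (((k : Nat) + 1 : Int) + 1) 1
        = PySem.List.pyRange 1 ((k : Int) + 1) 1 ++ [(k : Int) + 1] := by
      have := PySem.List.pyRange_one_succ_right (a := 1) (b := (k : Int) + 1) (by omega)
      exact this
    push_cast
    rw [h, List.foldl_append, ih]
    obtain ⟨m, hm⟩ := tri_exists k
    have hm2 : ((k : Int) + 1) * (((k : Int) + 1) + 1) = 2 * (m + (k : Int) + 1) := by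
      ring_nf; ring_nf at hm; omega
    rw [hm, hm2, fd2_even, fd2_even]
    simp [List.foldl]
    ring

lemma sums_eq (price : Int) (count : Int) :
    (PySem.List.pyRange 1 (count + 1) 1).foldl (fun a i => a + price * i) 0
      = price * PySem.Int.floordiv ((if count > 0 then count else 0) * ((if count > 0 then count else 0) + 1)) 2 := by
  split_ifs with h
  · obtain ⟨k, hk⟩ : ∃ k : Nat, count = (k : Int) := ⟨count.toNat, by omega⟩
    subst hk
    exact fold_sum price k
  · rw [PySem.List.pyRange_one_eq_nil (by omega)]
    simp [PySem.Int.floordiv]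

-- ===== VERDICT (by name: the statement is the Claim_ definition above) =====
theorem solution_spec : Claim_equal_solution := by
  intro price money count _
  unfold Spec_solution solution solution_alt
  rw [sums_eq price count]
  set t := price * PySem.Int.floordiv ((if count > 0 then count else 0) * ((if count > 0 then count else 0) + 1)) 2
  dsimp only
  omega
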